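-- pv_equiv track=rewrite | github.com/TinyCircuits/TinyCircuits-Tiny-Game-Engine | filesystem/Games/1TileMap/main.py | smooth_moore_cellular_automata
-- ===== SOURCE A (Python) =====
-- def get_moore_surrounding_tiles(map, x, y, edges_are_walls):
--     tile_count = 0
--     width = len(map)
--     height = len(map[0])
--
--     for neighbour_x in range(x - 1, x + 2):
--         for neighbour_y in range(y - 1, y + 2):
--             if 0 <= neighbour_x < width and 0 <= neighbour_y < height:
--                 if neighbour_x != x or neighbour_y != y:
--                     tile_count += map[neighbour_x][neighbour_y]
--
--     return tile_count
--
-- def smooth_moore_cellular_automata(map, edges_are_walls, smooth_count):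
--     width = len(map)
--     height = len(map[0])
--
--     for _ in range(smooth_count):
--         new_map = [[0 for _ in range(height)] for _ in range(width)]
--         for x in range(width):
--             for y in range(height):
--                 surrounding_tiles = get_moore_surrounding_tiles(map, x, y, edges_are_walls)
--
--                 if edges_are_walls and (x == 0 or x == width - 1 or y == 0 or y == height - 1):
--                     new_map[x][y] = 1
--                 elif surrounding_tiles > 4:
--                     new_map[x][y] = 1
--                 elif surrounding_tiles < 4:
--                     new_map[x][y] = 0
--                 else:
--                     new_map[x][y] = map[x][y]
--         map = new_map
--
--     return map
-- ===== SOURCE B (Python) =====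
-- def _window_row_sums(row, height):
--     # horizontal 3-wide clamped window sums for one row
--     return [sum(row[max(0, y - 1):min(height, y + 2)]) for y in range(height)]
--
-- def smooth_moore_cellular_automata(map, edges_are_walls, smooth_count):
--     width = len(map)
--     height = len(map[0])
--     grid = map
--     for _ in range(smooth_count):
--         # separable pass: horizontal window sums per row, then add three rows vertically
--         H = [_window_row_sums(row, height) for row in grid]
--         zero = [0] * height
--         new_grid = []
--         for x in range(width):
--             above = H[x - 1] if x > 0 else zero
--             cur = H[x]
--             below = H[x + 1] if x + 1 < width else zero
--             row = grid[x]
--             new_row = []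
--             for y in range(height):
--                 if edges_are_walls and (x == 0 or x == width - 1 or y == 0 or y == height - 1):
--                     new_row.append(1)
--                 else:
--                     s = above[y] + cur[y] + below[y] - row[y]
--                     new_row.append(1 if s > 4 else (0 if s < 4 else row[y]))
--             new_grid.append(new_row)
--         grid = new_grid
--     return grid
-- ===== Notes on version B (the rewrite author's own statement) =====
-- stated objective: faster
-- what changed: Replaces the per-cell 3x3 bounds-checked neighbour scan (helper call with two nested range loops per cell) by a separable convolution: each pass computes clamped 3-wide horizontal window sums per row via list slices, then adds three of those row lists vertically and subtracts the centre, with the same threshold branches; intended as faster by a constant factor (a timing run measured 2.6-3.0x at the sizes where A finished, unconfirmed at the largest size where both timed out).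
import Mathlib
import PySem

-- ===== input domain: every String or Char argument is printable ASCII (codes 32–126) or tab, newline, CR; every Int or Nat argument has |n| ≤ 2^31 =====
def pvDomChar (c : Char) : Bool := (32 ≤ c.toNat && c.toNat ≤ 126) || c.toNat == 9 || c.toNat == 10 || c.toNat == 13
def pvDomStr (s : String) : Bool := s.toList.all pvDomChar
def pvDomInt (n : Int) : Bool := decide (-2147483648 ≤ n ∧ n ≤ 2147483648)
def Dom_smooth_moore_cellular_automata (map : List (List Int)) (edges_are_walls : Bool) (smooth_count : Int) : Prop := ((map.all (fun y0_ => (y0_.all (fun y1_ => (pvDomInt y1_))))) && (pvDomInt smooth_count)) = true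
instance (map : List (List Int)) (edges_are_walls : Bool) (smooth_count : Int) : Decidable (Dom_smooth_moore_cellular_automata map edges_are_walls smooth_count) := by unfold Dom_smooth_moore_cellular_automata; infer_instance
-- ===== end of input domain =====

-- B replaces the per-cell 3×3 bounds-checked scan by a separable pass (clamped horizontal
-- window sums per row, then three-row vertical addition); intended as faster by a constant
-- factor (a timing run measured ~2.6-3.0x at the sizes where A finished).


-- ===== PORT A =====
def get_moore_surrounding_tiles (map : List (List Int)) (x y : Int) (edges_are_walls : Bool) : Int :=
  let width : Int := PySem.List.len map
  let height : Int := PySem.List.len (PySem.List.pyGetD map 0 [])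
  (PySem.List.pyRange (x - 1) (x + 2) 1).foldl (fun tile_count nx =>
    (PySem.List.pyRange (y - 1) (y + 2) 1).foldl (fun tile_count ny =>
      if 0 ≤ nx ∧ nx < width ∧ 0 ≤ ny ∧ ny < height then
        if nx ≠ x ∨ ny ≠ y then tile_count + PySem.List.pyGetD (PySem.List.pyGetD map nx []) ny 0
        else tile_count
      else tile_count) tile_count) 0

-- one iteration of A's smoothing loop (new_map built cell by cell)
def pvStepA (width height : Int) (edges_are_walls : Bool) (m : List (List Int)) : List (List Int) :=
  (PySem.List.pyRange 0 width 1).map (fun x =>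
    (PySem.List.pyRange 0 height 1).map (fun y =>
      let surrounding_tiles := get_moore_surrounding_tiles m x y edges_are_walls
      if edges_are_walls && (x == 0 || x == width - 1 || y == 0 || y == height - 1) then 1
      else if surrounding_tiles > 4 then 1
      else if surrounding_tiles < 4 then 0
      else PySem.List.pyGetD (PySem.List.pyGetD m x []) y 0))

def smooth_moore_cellular_automata (map : List (List Int)) (edges_are_walls : Bool) (smooth_count : Int) : List (List Int) :=
  let width : Int := PySem.List.len map
  let height : Int := PySem.List.len (PySem.List.pyGetD map 0 [])
  (PySem.List.pyRange 0 smooth_count 1).foldl (fun m _ => pvStepA width height edges_are_walls m) map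

-- ===== PORT B =====
def pvWindowRowSums (row : List Int) (height : Int) : List Int :=
  (PySem.List.pyRange 0 height 1).map (fun y =>
    (PySem.List.slice row (some (max 0 (y - 1))) (some (min height (y + 2)))).sum)

-- one iteration of B's smoothing loop: horizontal window sums, then three-row vertical add
def pvStepB (width height : Int) (edges_are_walls : Bool) (grid : List (List Int)) : List (List Int) :=
  let H := grid.map (fun row => pvWindowRowSums row height)
  let zero : List Int := List.replicate height.toNat 0
  (PySem.List.pyRange 0 width 1).map (fun x =>
    let above := if 0 < x then PySem.List.pyGetD H (x - 1) [] else zero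
    let cur := PySem.List.pyGetD H x []
    let below := if x + 1 < width then PySem.List.pyGetD H (x + 1) [] else zero
    let row := PySem.List.pyGetD grid x []
    (PySem.List.pyRange 0 height 1).map (fun y =>
      if edges_are_walls && (x == 0 || x == width - 1 || y == 0 || y == height - 1) then 1
      else
        let s := PySem.List.pyGetD above y 0 + PySem.List.pyGetD cur y 0 +
                 PySem.List.pyGetD below y 0 - PySem.List.pyGetD row y 0
        if s > 4 then 1 else if s < 4 then 0 else PySem.List.pyGetD row y 0))

def smooth_moore_cellular_automata_alt (map : List (List Int)) (edges_are_walls : Bool) (smooth_count : Int) : List (List Int) :=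
  let width : Int := PySem.List.len map
  let height : Int := PySem.List.len (PySem.List.pyGetD map 0 [])
  (PySem.List.pyRange 0 smooth_count 1).foldl (fun grid _ => pvStepB width height edges_are_walls grid) map

-- ===== PRECONDITION & SPEC =====
-- Pre_ excludes exactly the inputs where A raises: the empty map (len(map[0]) IndexError) and,
-- when at least one smoothing pass runs, ragged maps with a row shorter than row 0 (IndexError).
def Pre_smooth_moore_cellular_automata (map : List (List Int)) (edges_are_walls : Bool) (smooth_count : Int) : Prop :=
  map ≠ [] ∧ (smooth_count ≤ 0 ∨ ∀ row ∈ map, (PySem.List.pyGetD map 0 []).length ≤ row.length)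
instance (map : List (List Int)) (edges_are_walls : Bool) (smooth_count : Int) : Decidable (Pre_smooth_moore_cellular_automata map edges_are_walls smooth_count) := by unfold Pre_smooth_moore_cellular_automata; infer_instance

def pvWitness_smooth_moore_cellular_automata : List (List Int) × Bool × Int := ([[1, 0, 1], [0, 1, 0], [1, 1, 1]], true, 2)

def Spec_smooth_moore_cellular_automata (map : List (List Int)) (edges_are_walls : Bool) (smooth_count : Int) (out : List (List Int)) : Prop := out = smooth_moore_cellular_automata_alt map edges_are_walls smooth_count
instance (map : List (List Int)) (edges_are_walls : Bool) (smooth_count : Int) (out : List (List Int)) : Decidable (Spec_smooth_moore_cellular_automata map edges_are_walls smooth_count out) := by unfold Spec_smooth_moore_cellular_automata; infer_instance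

-- ===== CLAIM (what is proved, stated in full; the proofs are below) =====
def Claim_equal_smooth_moore_cellular_automata : Prop := ∀ (map : List (List Int)) (edges_are_walls : Bool) (smooth_count : Int), Dom_smooth_moore_cellular_automata map edges_are_walls smooth_count → Pre_smooth_moore_cellular_automata map edges_are_walls smooth_count → Spec_smooth_moore_cellular_automata map edges_are_walls smooth_count (smooth_moore_cellular_automata map edges_are_walls smooth_count)

-- ===== LEMMAS AND PROOFS =====

-- bounded grid entry: 0 outside the w×h box
def pvE (w h : Nat) (m : List (List Int)) (nx ny : Int) : Int :=
  if 0 ≤ nx ∧ nx < (w : Int) ∧ 0 ≤ ny ∧ ny < (h : Int) then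
    PySem.List.pyGetD (PySem.List.pyGetD m nx []) ny 0
  else 0

-- the loop invariant: w rows, each of length ≥ h, row 0 of length exactly h
def pvInv (w h : Nat) (m : List (List Int)) : Prop :=
  m.length = w ∧ (∀ row ∈ m, h ≤ row.length) ∧ (PySem.List.pyGetD m 0 []).length = h

lemma pvRange3 (a : Int) : PySem.List.pyRange (a - 1) (a + 2) 1 = [a - 1, a, a + 1] := by
  rw [PySem.List.pyRange_one_cons (by omega)]
  have e1 : a - 1 + 1 = a := by ring
  rw [e1, PySem.List.pyRange_one_cons (by omega), PySem.List.pyRange_one_cons (by omega),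
    PySem.List.pyRange_one_eq_nil (by omega)]

lemma pv_ite_add (c : Prop) [Decidable c] (t e : Int) :
    (if c then t + e else t) = t + (if c then e else 0) := by split_ifs <;> ring

lemma pv_sum_slice : ∀ (n : Nat) (r : List Int) (a b : Int), 0 ≤ a → 0 ≤ b → b ≤ (r.length : Int) →
    (b - a).toNat = n →
    (PySem.List.slice r (some a) (some b)).sum =
      ((PySem.List.pyRange a b 1).map (fun t => PySem.List.pyGetD r t 0)).sum := by
  intro n
  induction n with
  | zero =>
    intro r a b ha hb hlen hn
    rw [PySem.List.slice_toNat r ha hb, PySem.List.pyRange_one_eq_nil (by omega)]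
    have h : b.toNat - a.toNat = 0 := by omega
    simp [h]
  | succ n ih =>
    intro r a b ha hb hlen hn
    have hab : a < b := by omega
    have hlt : a.toNat < r.length := by omega
    rw [PySem.List.slice_toNat r ha hb, List.drop_eq_getElem_cons hlt]
    have hk : b.toNat - a.toNat = n + 1 := by omega
    rw [hk, List.take_succ_cons, List.sum_cons,
      PySem.List.pyRange_one_cons hab, List.map_cons, List.sum_cons,
      PySem.List.pyGetD_eq_getElem r 0 ha (by omega)]
    have ha1 : (a + 1).toNat = a.toNat + 1 := by omega
    have hih := ih r (a + 1) b (by omega) hb hlen (by omega)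
    rw [PySem.List.slice_toNat r (by omega) hb, ha1] at hih
    have hk2 : b.toNat - (a.toNat + 1) = n := by omega
    rw [hk2] at hih
    rw [← hih]

lemma pv_sum_clamp (f : Int → Int) (lo hi : Int) : ∀ (n : Nat) (a b : Int), (b - a).toNat = n →
    ((PySem.List.pyRange a b 1).map (fun t => if lo ≤ t ∧ t < hi then f t else 0)).sum =
      ((PySem.List.pyRange (max a lo) (min b hi) 1).map f).sum := by
  intro n
  induction n with
  | zero =>
    intro a b hn
    rw [PySem.List.pyRange_one_eq_nil (by omega), PySem.List.pyRange_one_eq_nil (by omega)]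
    simp
  | succ n ih =>
    intro a b hn
    have hab : a < b := by omega
    rw [PySem.List.pyRange_one_cons hab, List.map_cons, List.sum_cons, ih (a + 1) b (by omega)]
    by_cases hlo : lo ≤ a
    · by_cases hhi : a < hi
      · rw [max_eq_left hlo, max_eq_left (by omega), if_pos ⟨hlo, hhi⟩]
        conv_rhs => rw [PySem.List.pyRange_one_cons (lt_min_iff.mpr ⟨hab, hhi⟩)]
        rw [List.map_cons, List.sum_cons]
      · have h1 : min b hi ≤ max a lo :=
          le_trans (min_le_right _ _) (le_trans (by omega) (le_max_left _ _))
        have h2 : min b hi ≤ max (a + 1) lo :=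
          le_trans (min_le_right _ _) (le_trans (by omega) (le_max_left _ _))
        rw [PySem.List.pyRange_one_eq_nil h1, PySem.List.pyRange_one_eq_nil h2,
          if_neg (by omega)]
        simp
    · have h1 : max a lo = max (a + 1) lo :=
        (max_eq_right (by omega)).trans (max_eq_right (by omega)).symm
      rw [h1, if_neg (by omega)]
      simp

lemma pv_hrow_val (h : Nat) (row : List Int) (hlen : h ≤ row.length) (y : Int)
    (hy0 : 0 ≤ y) (hy1 : y < (h : Int)) :
    PySem.List.pyGetD (pvWindowRowSums row (h : Int)) y 0 =
      (if 0 ≤ y - 1 ∧ y - 1 < (h : Int) then PySem.List.pyGetD row (y - 1) 0 else 0) +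
      (if 0 ≤ y ∧ y < (h : Int) then PySem.List.pyGetD row y 0 else 0) +
      (if 0 ≤ y + 1 ∧ y + 1 < (h : Int) then PySem.List.pyGetD row (y + 1) 0 else 0) := by
  unfold pvWindowRowSums
  rw [PySem.List.pyGetD_map_pyRange_of_nonneg _ _ _ _ hy0 hy1]
  rw [max_comm 0 (y - 1), min_comm (h : Int) (y + 2)]
  rw [pv_sum_slice ((min (y + 2) (h : Int)) - max (y - 1) 0).toNat row (max (y - 1) 0)
    (min (y + 2) (h : Int)) (le_max_right _ _)
    (le_min (by omega) (Int.natCast_nonneg h))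
    (le_trans (min_le_right _ _) (by exact_mod_cast hlen)) rfl]
  rw [← pv_sum_clamp (fun t => PySem.List.pyGetD row t 0) 0 (h : Int)
    ((y + 2) - (y - 1)).toNat (y - 1) (y + 2) rfl]
  rw [pvRange3 y]
  simp only [List.map_cons, List.map_nil, List.sum_cons, List.sum_nil]
  ring

-- A's neighbour scan equals the sum of the eight bounded neighbour entries
lemma pv_surround (w h : Nat) (m : List (List Int)) (hw : m.length = w)
    (h0 : (PySem.List.pyGetD m 0 []).length = h) (x y : Int) (ew : Bool) :
    get_moore_surrounding_tiles m x y ew =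
      pvE w h m (x - 1) (y - 1) + pvE w h m (x - 1) y + pvE w h m (x - 1) (y + 1) +
      pvE w h m x (y - 1) + pvE w h m x (y + 1) +
      pvE w h m (x + 1) (y - 1) + pvE w h m (x + 1) y + pvE w h m (x + 1) (y + 1) := by
  unfold get_moore_surrounding_tiles
  simp only [PySem.List.len_eq, hw, h0]
  rw [pvRange3 x, pvRange3 y]
  have hx1 : x - 1 ≠ x := by omega
  have hx2 : x + 1 ≠ x := by omega
  have hy1 : y - 1 ≠ y := by omega
  have hy2 : y + 1 ≠ y := by omega
  simp only [List.foldl_cons, List.foldl_nil, hx1, hy1, hx2, hy2, ne_eq, not_true_eq_false,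
    or_false, false_or, or_self, if_true, not_false_eq_true, if_neg, ite_self]
  simp only [pv_ite_add, pvE]
  ring

lemma pv_zero_get (h : Nat) (y : Int) (hy0 : 0 ≤ y) (hy1 : y < (h : Int)) :
    PySem.List.pyGetD (List.replicate ((h : Int)).toNat (0 : Int)) y 0 = 0 := by
  rw [PySem.List.pyGetD_eq_getElem _ _ hy0 (by simp; omega)]
  simp

lemma pvE_out (w h : Nat) (m : List (List Int)) (nx ny : Int)
    (hnx : nx < 0 ∨ (w : Int) ≤ nx) : pvE w h m nx ny = 0 := by
  unfold pvE
  rcases hnx with h1 | h1 <;> rw [if_neg (by omega)]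

lemma pvE_center (w h : Nat) (m : List (List Int)) (x y : Int)
    (hx0 : 0 ≤ x) (hx1 : x < (w : Int)) (hy0 : 0 ≤ y) (hy1 : y < (h : Int)) :
    PySem.List.pyGetD (PySem.List.pyGetD m x []) y 0 = pvE w h m x y := by
  unfold pvE
  rw [if_pos ⟨hx0, hx1, hy0, hy1⟩]

-- one column of B's vertical sum is the three bounded entries of that row
lemma pv_col (w h : Nat) (m : List (List Int)) (hlen : m.length = w)
    (hrows : ∀ row ∈ m, h ≤ row.length) (nx : Int) (hnx0 : 0 ≤ nx) (hnx1 : nx < (w : Int))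
    (y : Int) (hy0 : 0 ≤ y) (hy1 : y < (h : Int)) :
    PySem.List.pyGetD (PySem.List.pyGetD (m.map (fun r => pvWindowRowSums r (h : Int))) nx []) y 0 =
      pvE w h m nx (y - 1) + pvE w h m nx y + pvE w h m nx (y + 1) := by
  have hlt : nx.toNat < m.length := by omega
  rw [PySem.List.pyGetD_eq_getElem _ [] hnx0 (by rw [List.length_map, hlen]; exact hnx1)]
  rw [List.getElem_map]
  rw [pv_hrow_val h _ (hrows _ (List.getElem_mem hlt)) y hy0 hy1]
  have hrow : PySem.List.pyGetD m nx [] = m[nx.toNat] :=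
    PySem.List.pyGetD_eq_getElem m [] hnx0 (by omega)
  simp only [pvE, hrow, hnx0, hnx1, true_and]

-- the invariant makes one A-step equal one B-step
lemma pv_step_eq (w h : Nat) (ew : Bool) (m : List (List Int))
    (hinv : pvInv w h m) : pvStepA (w : Int) (h : Int) ew m = pvStepB (w : Int) (h : Int) ew m := by
  obtain ⟨hlen, hrows, h0⟩ := hinv
  simp only [pvStepA, pvStepB]
  refine List.map_congr_left ?_
  intro x hx
  rw [PySem.List.mem_pyRange_one] at hx
  obtain ⟨hx0, hx1⟩ := hx
  refine List.map_congr_left ?_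
  intro y hy
  rw [PySem.List.mem_pyRange_one] at hy
  obtain ⟨hy0, hy1⟩ := hy

  have hst : get_moore_surrounding_tiles m x y ew =
      (if 0 < x then PySem.List.pyGetD (PySem.List.pyGetD
          (m.map (fun r => pvWindowRowSums r (h : Int))) (x - 1) []) y 0
        else PySem.List.pyGetD (List.replicate ((h : Int)).toNat (0 : Int)) y 0) +
      PySem.List.pyGetD (PySem.List.pyGetD
          (m.map (fun r => pvWindowRowSums r (h : Int))) x []) y 0 +
      (if x + 1 < (w : Int) then PySem.List.pyGetD (PySem.List.pyGetD
          (m.map (fun r => pvWindowRowSums r (h : Int))) (x + 1) []) y 0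
        else PySem.List.pyGetD (List.replicate ((h : Int)).toNat (0 : Int)) y 0) -
      PySem.List.pyGetD (PySem.List.pyGetD m x []) y 0 := by
    rw [pv_surround w h m hlen h0 x y ew,
      pv_col w h m hlen hrows x hx0 hx1 y hy0 hy1,
      pvE_center w h m x y hx0 hx1 hy0 hy1]
    by_cases hxl : 0 < x
    · rw [if_pos hxl, pv_col w h m hlen hrows (x - 1) (by omega) (by omega) y hy0 hy1]
      by_cases hxr : x + 1 < (w : Int)
      · rw [if_pos hxr, pv_col w h m hlen hrows (x + 1) (by omega) hxr y hy0 hy1]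
        ring
      · rw [if_neg hxr, pv_zero_get h y hy0 hy1,
          pvE_out w h m (x + 1) (y - 1) (Or.inr (by omega)),
          pvE_out w h m (x + 1) y (Or.inr (by omega)),
          pvE_out w h m (x + 1) (y + 1) (Or.inr (by omega))]
        ring
    · rw [if_neg hxl, pv_zero_get h y hy0 hy1,
        pvE_out w h m (x - 1) (y - 1) (Or.inl (by omega)),
        pvE_out w h m (x - 1) y (Or.inl (by omega)),
        pvE_out w h m (x - 1) (y + 1) (Or.inl (by omega))]
      by_cases hxr : x + 1 < (w : Int)
      · rw [if_pos hxr, pv_col w h m hlen hrows (x + 1) (by omega) hxr y hy0 hy1]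
        ring
      · rw [if_neg hxr,
          pvE_out w h m (x + 1) (y - 1) (Or.inr (by omega)),
          pvE_out w h m (x + 1) y (Or.inr (by omega)),
          pvE_out w h m (x + 1) (y + 1) (Or.inr (by omega))]
        ring
  simp only [apply_ite (fun l : List Int => PySem.List.pyGetD l y 0)]
  rw [hst]


lemma pv_step_inv (w h : Nat) (hw1 : 1 ≤ w) (ew : Bool) (m : List (List Int)) :
    pvInv w h (pvStepB (w : Int) (h : Int) ew m) := by
  simp only [pvStepB, pvInv]
  refine ⟨by simp [PySem.List.length_pyRange_one], ?_, ?_⟩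
  · intro row hrow
    simp only [List.mem_map] at hrow
    obtain ⟨x, hx, rfl⟩ := hrow
    simp [PySem.List.length_pyRange_one]
  · rw [PySem.List.pyGetD_eq_getElem _ [] le_rfl
      (by simp [PySem.List.length_pyRange_one]; omega)]
    simp [PySem.List.length_pyRange_one, PySem.List.getElem_pyRange_one]

lemma pv_fold_eq (w h : Nat) (hw1 : 1 ≤ w) (ew : Bool) :
    ∀ (l : List Int) (m : List (List Int)), pvInv w h m →
      l.foldl (fun m _ => pvStepA (w : Int) (h : Int) ew m) m =
        l.foldl (fun m _ => pvStepB (w : Int) (h : Int) ew m) m := by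
  intro l
  induction l with
  | nil => intro m _; rfl
  | cons a l ih =>
    intro m hm
    simp only [List.foldl_cons]
    rw [pv_step_eq w h ew m hm]
    exact ih _ (pv_step_inv w h hw1 ew m)

-- ===== VERDICT (by name: the statement is the Claim_ definition above) =====
theorem smooth_moore_cellular_automata_spec : Claim_equal_smooth_moore_cellular_automata := by
  intro map ew sc _ hpre
  unfold Spec_smooth_moore_cellular_automata
  obtain ⟨hne, hrag⟩ := hpre
  unfold smooth_moore_cellular_automata smooth_moore_cellular_automata_alt
  by_cases hsc : sc ≤ 0
  · rw [PySem.List.pyRange_one_eq_nil (by omega)]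
    rfl
  · have hrows : ∀ row ∈ map, (PySem.List.pyGetD map 0 []).length ≤ row.length := by
      rcases hrag with h | h
      · omega
      · exact h
    have hw1 : 1 ≤ map.length := by
      cases map with
      | nil => exact absurd rfl hne
      | cons a l => simp
    simp only [PySem.List.len_eq]
    exact pv_fold_eq map.length (PySem.List.pyGetD map 0 []).length hw1 ew
      (PySem.List.pyRange 0 sc 1) map ⟨rfl, hrows, rfl⟩
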